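-- pv_equiv track=rewrite | github.com/CarlosGomes00/Transformer-Based-Models-for-Chemical-Fingerprint-Prediction | src/mgf_tools/mgf_checks.py | check_mgf_data
-- ===== SOURCE A (Python) =====
-- def check_mgf_data(spectra: list):
--
--     """
--     Analyzes an .MGF file and summarizes key statistics
--
--     Parameters:
--         spectra : list of dicts
--             A list of dictionaries containing the spectra
--
--     Returns:
--         dict
--             A dictionary containing:
--                 - 'Total compounds': Total number of spectra in the file
--                 - 'Unique compounds': Number of unique compound names identified
--                 - 'Unknown compounds': Number of spectra missing a compound name
--                 - 'Positive ionization mode': Number of spectra in positive ion mode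
--                 - 'Negative ionization mode': Number of spectra in negative ion mode
--                 - 'Unknown ionization mode': Number of spectra where ion mode is unspecified or unrecognized
--     """
--
--     n_compounds = len(spectra)
--
--     unique = set()
--     unknown_compounds = 0
--     pos_ion_mode = 0
--     neg_ion_mode = 0
--     unknown_ion_mode = 0
--
--     for spectrum in spectra:
--         params = spectrum['params']
--         compound_name = params.get('compound_name', None)
--         if compound_name and compound_name.strip():
--             unique.add(compound_name)
--         else:
--             unknown_compounds += 1
--
--         ion_mode = params.get('ionmode', None)
--         if ion_mode == 'positive':
--             pos_ion_mode += 1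
--         elif ion_mode == 'negative':
--             neg_ion_mode += 1
--         else:
--             unknown_ion_mode += 1
--
--     unique = len(unique)
--
--     return {'Total compounds': n_compounds,
--             'Unique compounds': unique,
--             'Unknown compounds': unknown_compounds,
--             'Positive ionization mode': pos_ion_mode,
--             'Negative ionization mode': neg_ion_mode,
--             'Unknown ionization mode': unknown_ion_mode}
-- ===== SOURCE B (Python) =====
-- def check_mgf_data(spectra: list):
--     n = len(spectra)
--     names = [s['params'].get('compound_name') for s in spectra]
--     modes = [s['params'].get('ionmode') for s in spectra]
--     # ion-mode buckets from a histogram built once, unknowns by complement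
--     hist = {}
--     for m in modes:
--         hist[m] = hist.get(m, 0) + 1
--     pos = hist.get('positive', 0)
--     neg = hist.get('negative', 0)
--     # unique names by sort-then-adjacent-scan instead of a hash set
--     valid = sorted(nm for nm in names if nm and nm.strip())
--     unique = 0
--     prev = None
--     for nm in valid:
--         if nm != prev:
--             unique += 1
--         prev = nm
--     return {'Total compounds': n,
--             'Unique compounds': unique,
--             'Unknown compounds': n - len(valid),
--             'Positive ionization mode': pos,
--             'Negative ionization mode': neg,
--             'Unknown ionization mode': n - pos - neg}
-- ===== Notes on version B (the rewrite author's own statement) =====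
-- stated objective: alternative
-- what changed: Unique compounds are counted by sorting the valid names and scanning adjacent pairs for changes (sort-then-scan instead of a hash set), ion-mode buckets come from a histogram dict built once with two lookups, and both 'unknown' buckets are derived by complement arithmetic instead of else-branch counters.
import Mathlib
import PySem

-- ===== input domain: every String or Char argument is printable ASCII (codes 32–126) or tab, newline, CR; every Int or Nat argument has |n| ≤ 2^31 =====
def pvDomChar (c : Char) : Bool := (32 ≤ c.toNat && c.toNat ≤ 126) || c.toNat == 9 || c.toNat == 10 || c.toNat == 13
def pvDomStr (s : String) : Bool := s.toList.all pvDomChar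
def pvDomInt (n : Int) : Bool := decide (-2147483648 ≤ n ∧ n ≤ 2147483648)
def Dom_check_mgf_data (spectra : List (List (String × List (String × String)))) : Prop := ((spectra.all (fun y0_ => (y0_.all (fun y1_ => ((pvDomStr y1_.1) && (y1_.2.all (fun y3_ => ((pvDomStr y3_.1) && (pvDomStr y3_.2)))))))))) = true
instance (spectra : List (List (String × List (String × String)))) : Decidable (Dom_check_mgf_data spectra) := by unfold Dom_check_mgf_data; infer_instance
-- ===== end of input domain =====

-- B counts unique names by sort-then-adjacent-scan, takes ion-mode buckets from a histogram
-- dict built once, and derives both 'unknown' buckets by complement arithmetic; alternative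
-- algorithm of similar cost.

-- ===== PORT A =====
-- Python truthiness of `compound_name and compound_name.strip()` for a present string
def pvNamed (s : String) : Bool := decide (s.toList ≠ []) && decide ((PySem.Str.strip s).toList ≠ [])

-- one iteration of A's loop over its five accumulators (unique, unknown, pos, neg, unknown_ion)
def pvStepA (acc : PySem.Set String × Int × Int × Int × Int)
    (spectrum : List (String × List (String × String))) :
    PySem.Set String × Int × Int × Int × Int :=
  match acc with
  | (u, c, p, g, k) =>
    let params := ((PySem.Dict.mk spectrum).get? "params").getD []   -- KeyError excluded by Pre_
    let uc : PySem.Set String × Int :=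
      match (PySem.Dict.mk params).get? "compound_name" with
      | some s => if pvNamed s then (PySem.Set.add u s, c) else (u, c + 1)
      | none => (u, c + 1)
    let im := (PySem.Dict.mk params).get? "ionmode"
    if im = some "positive" then (uc.1, uc.2, p + 1, g, k)
    else if im = some "negative" then (uc.1, uc.2, p, g + 1, k)
    else (uc.1, uc.2, p, g, k + 1)

def check_mgf_data (spectra : List (List (String × List (String × String)))) : List (String × Int) :=
  let n : Int := spectra.length
  let st := spectra.foldl pvStepA (PySem.Set.empty, 0, 0, 0, 0)
  [("Total compounds", n),
   ("Unique compounds", (PySem.Set.len st.1 : Int)),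
   ("Unknown compounds", st.2.1),
   ("Positive ionization mode", st.2.2.1),
   ("Negative ionization mode", st.2.2.2.1),
   ("Unknown ionization mode", st.2.2.2.2)]

-- ===== PORT B =====
-- names = [s['params'].get('compound_name') for s in spectra]
def pvNames (spectra : List (List (String × List (String × String)))) : List (Option String) :=
  spectra.map (fun s => (PySem.Dict.mk (((PySem.Dict.mk s).get? "params").getD [])).get? "compound_name")

-- modes = [s['params'].get('ionmode') for s in spectra]
def pvModes (spectra : List (List (String × List (String × String)))) : List (Option String) :=
  spectra.map (fun s => (PySem.Dict.mk (((PySem.Dict.mk s).get? "params").getD [])).get? "ionmode")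

def check_mgf_data_alt (spectra : List (List (String × List (String × String)))) : List (String × Int) :=
  let n : Int := spectra.length
  let names := pvNames spectra
  let modes := pvModes spectra
  -- hist[m] = hist.get(m, 0) + 1
  let hist : PySem.Dict (Option String) Int :=
    modes.foldl (fun d m => d.insert m (d.getD m 0 + 1)) PySem.Dict.empty
  let pos : Int := hist.getD (some "positive") 0
  let neg : Int := hist.getD (some "negative") 0
  -- valid = sorted(nm for nm in names if nm and nm.strip())
  let valid := PySem.List.sorted
    (names.filterMap (fun o => match o with
      | some nm => if pvNamed nm then some nm else none
      | none => none)) (fun x => x) false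
  -- change-count scan with a `prev` variable
  let uq := valid.foldl
    (fun (st : Int × Option String) nm =>
      (if some nm ≠ st.2 then st.1 + 1 else st.1, some nm)) ((0 : Int), (none : Option String))
  [("Total compounds", n),
   ("Unique compounds", uq.1),
   ("Unknown compounds", n - valid.length),
   ("Positive ionization mode", pos),
   ("Negative ionization mode", neg),
   ("Unknown ionization mode", n - pos - neg)]

-- ===== PRECONDITION & SPEC =====
-- Pre_ excludes exactly the spectra missing a 'params' key, on which Python A raises KeyError.
def Pre_check_mgf_data (spectra : List (List (String × List (String × String)))) : Prop :=
  ∀ s ∈ spectra, (PySem.Dict.mk s).contains "params" = true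
instance (spectra : List (List (String × List (String × String)))) : Decidable (Pre_check_mgf_data spectra) := by unfold Pre_check_mgf_data; infer_instance

def pvWitness_check_mgf_data : (List (List (String × List (String × String)))) :=
  [[("params", [("compound_name", "Aspirin"), ("ionmode", "positive")])],
   [("params", [("ionmode", "negative")])]]

def Spec_check_mgf_data (spectra : List (List (String × List (String × String)))) (out : List (String × Int)) : Prop := out = check_mgf_data_alt spectra
instance (spectra : List (List (String × List (String × String)))) (out : List (String × Int)) : Decidable (Spec_check_mgf_data spectra out) := by unfold Spec_check_mgf_data; infer_instance

-- ===== CLAIM (what is proved, stated in full; the proofs are below) =====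
def Claim_equal_check_mgf_data : Prop := ∀ (spectra : List (List (String × List (String × String)))), Dom_check_mgf_data spectra → Pre_check_mgf_data spectra → Spec_check_mgf_data spectra (check_mgf_data spectra)

-- ===== LEMMAS AND PROOFS =====

-- the valid names, unsorted (what A's set collects and what B filters before sorting)
def pvValidNames (spectra : List (List (String × List (String × String)))) : List String :=
  spectra.filterMap (fun s =>
    match (PySem.Dict.mk (((PySem.Dict.mk s).get? "params").getD [])).get? "compound_name" with
    | some nm => if pvNamed nm then some nm else none
    | none => none)

-- A's loop state after the whole list, from an arbitrary start state
theorem pvFoldA_eq (spectra : List (List (String × List (String × String))))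
    (u : PySem.Set String) (c p g k : Int) :
    spectra.foldl pvStepA (u, c, p, g, k) =
      (PySem.Set.update u (pvValidNames spectra),
       c + ((spectra.length : Int) - (pvValidNames spectra).length),
       p + PySem.List.count (pvModes spectra) (some "positive"),
       g + PySem.List.count (pvModes spectra) (some "negative"),
       k + ((spectra.length : Int)
            - PySem.List.count (pvModes spectra) (some "positive")
            - PySem.List.count (pvModes spectra) (some "negative"))) := by
  induction spectra generalizing u c p g k with
  | nil =>
    simp [pvValidNames, pvModes, PySem.List.count, PySem.Set.update]
  | cons s t ih =>
    have hvn : pvValidNames (s :: t) =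
        (match (PySem.Dict.mk (((PySem.Dict.mk s).get? "params").getD [])).get? "compound_name" with
         | some nm => if pvNamed nm then [nm] else []
         | none => ([] : List String)) ++ pvValidNames t := by
      simp only [pvValidNames, List.filterMap_cons]
      rcases (PySem.Dict.mk (((PySem.Dict.mk s).get? "params").getD [])).get? "compound_name" with _ | nm
      · rfl
      · by_cases hnm : pvNamed nm <;> simp [hnm]
    have hms : pvModes (s :: t) =
        (PySem.Dict.mk (((PySem.Dict.mk s).get? "params").getD [])).get? "ionmode" :: pvModes t := rfl
    simp only [List.foldl_cons, pvStepA, hvn, hms]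
    rcases hcn : (PySem.Dict.mk (((PySem.Dict.mk s).get? "params").getD [])).get? "compound_name" with _ | nm
    · simp only [hcn]
      by_cases h1 : (PySem.Dict.mk (((PySem.Dict.mk s).get? "params").getD [])).get? "ionmode" = some "positive"
      · simp [h1, ih, PySem.List.count, List.count_cons, PySem.Set.update] <;> push_cast <;> omega
      · by_cases h2 : (PySem.Dict.mk (((PySem.Dict.mk s).get? "params").getD [])).get? "ionmode" = some "negative"
        · simp [h1, h2, ih, PySem.List.count, List.count_cons, PySem.Set.update] <;> push_cast <;> omega
        · simp [h1, h2, ih, PySem.List.count, List.count_cons, PySem.Set.update] <;> push_cast <;> omega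
    · by_cases hnm : pvNamed nm
      · simp only [hcn, hnm, if_true]
        by_cases h1 : (PySem.Dict.mk (((PySem.Dict.mk s).get? "params").getD [])).get? "ionmode" = some "positive"
        · simp [h1, hnm, ih, PySem.List.count, List.count_cons, PySem.Set.update] <;> push_cast <;> omega
        · by_cases h2 : (PySem.Dict.mk (((PySem.Dict.mk s).get? "params").getD [])).get? "ionmode" = some "negative"
          · simp [h1, h2, hnm, ih, PySem.List.count, List.count_cons, PySem.Set.update] <;> push_cast <;> omega
          · simp [h1, h2, hnm, ih, PySem.List.count, List.count_cons, PySem.Set.update] <;> push_cast <;> omega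
      · simp only [Bool.not_eq_true] at hnm
        simp only [hcn, hnm, Bool.false_eq_true, if_false]
        by_cases h1 : (PySem.Dict.mk (((PySem.Dict.mk s).get? "params").getD [])).get? "ionmode" = some "positive"
        · simp [h1, hnm, ih, PySem.List.count, List.count_cons, PySem.Set.update] <;> push_cast <;> omega
        · by_cases h2 : (PySem.Dict.mk (((PySem.Dict.mk s).get? "params").getD [])).get? "ionmode" = some "negative"
          · simp [h1, h2, hnm, ih, PySem.List.count, List.count_cons, PySem.Set.update] <;> push_cast <;> omega
          · simp [h1, h2, hnm, ih, PySem.List.count, List.count_cons, PySem.Set.update] <;> push_cast <;> omega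

-- B filters the same valid names as A (filterMap over the mapped names list)
theorem pvFilterNames_eq (spectra : List (List (String × List (String × String)))) :
    (pvNames spectra).filterMap (fun o => match o with
      | some nm => if pvNamed nm then some nm else none
      | none => none) = pvValidNames spectra := by
  simp [pvNames, pvValidNames, List.filterMap_map]

-- the change-count recursion behind B's prev-scan
def pvChg : Option String → List String → Int
  | _, [] => 0
  | p, a :: t => (if p = some a then 0 else 1) + pvChg (some a) t

theorem pvFoldScan_eq (l : List String) (u : Int) (p : Option String) :
    (l.foldl (fun (st : Int × Option String) nm =>
      (if some nm ≠ st.2 then st.1 + 1 else st.1, some nm)) (u, p)).1 = u + pvChg p l := by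
  induction l generalizing u p with
  | nil => simp [pvChg]
  | cons a t ih =>
    rw [List.foldl_cons, ih]
    by_cases h : p = some a
    · simp [pvChg, h]
    · have h' : some a ≠ p := fun hh => h hh.symm
      simp [pvChg, h, h']
      omega

theorem pvChg_some (t : List String) (a : String)
    (hs : t.Pairwise (· ≤ ·)) (ha : ∀ b ∈ t, a ≤ b) :
    pvChg (some a) t = ((t.toFinset \ {a}).card : Int) := by
  induction t generalizing a with
  | nil => simp [pvChg]
  | cons b t ih =>
    have hsb : t.Pairwise (· ≤ ·) := hs.of_cons
    have hb : ∀ c ∈ t, b ≤ c := fun c hc => (List.pairwise_cons.mp hs).1 c hc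
    have hrec := ih b hsb hb
    by_cases hab : a = b
    · subst hab
      have hset : (insert a t.toFinset) \ {a} = t.toFinset \ {a} := by
        ext x; by_cases hxa : x = a <;> simp [hxa]
      simp [pvChg, hrec, hset]
    · have hanotin : a ∉ t.toFinset := by
        simp only [List.mem_toFinset]
        intro hmem
        exact hab (le_antisymm (ha b (by simp)) (hb a hmem))
      have hbne : b ≠ a := fun h => hab h.symm
      have hset : (insert b t.toFinset) \ {a} = insert b (t.toFinset \ {b}) := by
        ext x
        simp only [Finset.mem_sdiff, Finset.mem_insert, Finset.mem_singleton]
        constructor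
        · rintro ⟨hx | hx, hxa⟩
          · exact Or.inl hx
          · by_cases hxb : x = b
            · exact Or.inl hxb
            · exact Or.inr ⟨hx, hxb⟩
        · rintro (hx | ⟨hx, hxb⟩)
          · exact ⟨Or.inl hx, hx ▸ hbne⟩
          · exact ⟨Or.inr hx, fun hxa => hanotin (hxa ▸ hx)⟩
      have hcard : (insert b (t.toFinset \ {b})).card = (t.toFinset \ {b}).card + 1 :=
        Finset.card_insert_of_notMem (by simp)
      have hne : ¬ ((some a : Option String) = some b) := by simp [hab]
      simp only [pvChg, hne, if_false, hrec, List.toFinset_cons, hset, hcard]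
      push_cast; ring

theorem pvChg_none (l : List String) (hs : l.Pairwise (· ≤ ·)) :
    pvChg none l = (l.toFinset.card : Int) := by
  cases l with
  | nil => simp [pvChg]
  | cons a t =>
    have h := pvChg_some t a hs.of_cons (fun b hb => (List.pairwise_cons.mp hs).1 b hb)
    have hins : insert a t.toFinset = insert a (t.toFinset \ {a}) := by
      ext x; by_cases hxa : x = a <;> simp [hxa]
    have hcard : (insert a (t.toFinset \ {a})).card = (t.toFinset \ {a}).card + 1 :=
      Finset.card_insert_of_notMem (by simp)
    simp only [pvChg, List.toFinset_cons, hins, hcard, h]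
    push_cast; ring

-- ofList l holds exactly the distinct elements of l
theorem pvSetLen_ofList (l : List String) :
    (PySem.Set.ofList l).length = l.toFinset.card := by
  have hfin : (PySem.Set.ofList l).toFinset = l.toFinset := by
    ext x; simp [PySem.Set.mem_ofList]
  rw [← hfin]
  exact (List.toFinset_card_of_nodup (PySem.Set.nodup_ofList l)).symm

-- ===== VERDICT (by name: the statement is the Claim_ definition above) =====
theorem check_mgf_data_spec : Claim_equal_check_mgf_data := by
  intro spectra _ _
  unfold Spec_check_mgf_data
  simp only [check_mgf_data, check_mgf_data_alt]
  rw [pvFilterNames_eq]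
  set v := pvValidNames spectra with hv
  have hpair : (PySem.List.sorted v (fun x => x) false).Pairwise (· ≤ ·) := by
    simpa using PySem.List.sorted_pairwise v (fun x => x)
  have hperm : (PySem.List.sorted v (fun x => x) false).Perm v := PySem.List.sorted_perm v _ _
  have hfin : (PySem.List.sorted v (fun x => x) false).toFinset = v.toFinset := by
    ext x; simp [List.mem_toFinset, hperm.mem_iff]
  have hscan := pvFoldScan_eq (PySem.List.sorted v (fun x => x) false) 0 none
  have hchg := pvChg_none (PySem.List.sorted v (fun x => x) false) hpair
  have hupd : PySem.Set.update PySem.Set.empty v = PySem.Set.ofList v := rfl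
  simp only [pvFoldA_eq, hupd, hscan, hchg, hfin, pvSetLen_ofList, PySem.List.length_sorted,
    PySem.Dict.getD_foldl_insert_add_one, PySem.List.count_eq]
  simp [PySem.List.count]
  refine ⟨?_, rfl⟩
  show (PySem.Set.ofList v).length = v.toFinset.card
  exact pvSetLen_ofList v
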